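-- pv_equiv track=rewrite | github.com/huggingface/peft | method_comparison/RLMath/reward.py | _fix_sqrt
-- ===== SOURCE A (Python) =====
-- def _fix_sqrt(string: str) -> str:
--     if "\\sqrt" not in string:
--         return string
--     splits = string.split("\\sqrt")
--     new_string = splits[0]
--     for split in splits[1:]:
--         if split and split[0] != "{":
--             new_string += "\\sqrt{" + split[0] + "}" + split[1:]
--         else:
--             new_string += "\\sqrt" + split
--     return new_string
-- ===== SOURCE B (Python) =====
-- def _fix_sqrt(string: str) -> str:
--     # single left-to-right scan; wraps the char after each \sqrt unless it is '{' or another \sqrt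
--     out = []
--     i = 0
--     n = len(string)
--     while i < n:
--         if string.startswith("\\sqrt", i):
--             out.append("\\sqrt")
--             i += 5
--             if i < n and string[i] != "{" and not string.startswith("\\sqrt", i):
--                 out.append("{" + string[i] + "}")
--                 i += 1
--         else:
--             out.append(string[i])
--             i += 1
--     return "".join(out)
-- ===== Notes on version B (the rewrite author's own statement) =====
-- stated objective: alternative
-- what changed: Replaced split-on-\sqrt-then-rebuild with a single left-to-right scan that emits characters and wraps the char following each \sqrt occurrence in place, with no membership pre-check and no intermediate list of segments.
import Mathlib
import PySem

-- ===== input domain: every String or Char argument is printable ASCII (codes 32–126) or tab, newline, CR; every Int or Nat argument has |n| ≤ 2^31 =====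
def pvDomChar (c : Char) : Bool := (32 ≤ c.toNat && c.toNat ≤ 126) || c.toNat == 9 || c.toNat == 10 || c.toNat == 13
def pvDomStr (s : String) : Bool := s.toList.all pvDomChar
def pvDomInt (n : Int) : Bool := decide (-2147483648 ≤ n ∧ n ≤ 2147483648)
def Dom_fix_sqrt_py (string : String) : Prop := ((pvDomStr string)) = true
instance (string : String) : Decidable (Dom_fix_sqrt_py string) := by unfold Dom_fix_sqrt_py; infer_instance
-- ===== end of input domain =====

-- B replaces A's split-and-rebuild with a single left-to-right scan (alternative decomposition, same cost).

-- ===== PORT A =====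
-- literal port of _fix_sqrt: membership guard, split on "\sqrt", rebuild segment by segment
def fix_sqrt_py (string : String) : String :=
  if PySem.Str.isIn "\\sqrt" string = false then string
  else
    let splits := PySem.Chars.splitOn string.toList "\\sqrt".toList
    let res := (splits.drop 1).foldl
      (fun ns sp =>
        if sp ≠ [] ∧ sp.headD ' ' ≠ '{' then
          ns ++ "\\sqrt{".toList ++ [sp.headD ' '] ++ ['}'] ++ sp.drop 1
        else
          ns ++ "\\sqrt".toList ++ sp)
      (splits.headD [])
    String.ofList res

-- ===== PORT B =====
-- Source B's scan: at each position, either consume "\sqrt" (and possibly wrap the next char) or copy one char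
def pvScanB (l : List Char) : List Char :=
  if h : "\\sqrt".toList.isPrefixOf l then
    "\\sqrt".toList ++
      (match h5 : l.drop 5 with
        | [] => []
        | c :: cs =>
          if c ≠ '{' ∧ ¬ "\\sqrt".toList.isPrefixOf (c :: cs) then
            '{' :: c :: '}' :: pvScanB cs
          else pvScanB (c :: cs))
  else
    match l with
    | [] => []
    | c :: cs => c :: pvScanB cs
termination_by l.length
decreasing_by
  · have h5' : 5 ≤ l.length := by
      simpa using (List.isPrefixOf_iff_prefix.mp h).length_le
    have hd : (l.drop 5).length = l.length - 5 := List.length_drop ..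
    rw [h5] at hd
    simp only [List.length_cons] at hd
    omega
  · have h5' : 5 ≤ l.length := by
      simpa using (List.isPrefixOf_iff_prefix.mp h).length_le
    have hd : (l.drop 5).length = l.length - 5 := List.length_drop ..
    rw [h5] at hd
    simp only [List.length_cons] at hd ⊢
    omega
  · simp only [List.length_cons]
    omega

def fix_sqrt_py_alt (string : String) : String :=
  String.ofList (pvScanB string.toList)

-- ===== PRECONDITION & SPEC =====
def Spec_fix_sqrt_py (string : String) (out : String) : Prop := out = fix_sqrt_py_alt string
instance (string : String) (out : String) : Decidable (Spec_fix_sqrt_py string out) := by unfold Spec_fix_sqrt_py; infer_instance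

-- ===== CLAIM (what is proved, stated in full; the proofs are below) =====
def Claim_equal_fix_sqrt_py : Prop := ∀ (string : String), Dom_fix_sqrt_py string → Spec_fix_sqrt_py string (fix_sqrt_py string)

-- ===== LEMMAS AND PROOFS =====

-- structural specification of PySem.Chars.splitOn specialized to separator "\sqrt"
def pvSp (l : List Char) : List (List Char) :=
  if h : "\\sqrt".toList.isPrefixOf l then [] :: pvSp (l.drop 5)
  else
    match l with
    | [] => [[]]
    | c :: cs => (pvSp cs).modifyHead (c :: ·)
termination_by l.length
decreasing_by
  · have h5 : 5 ≤ l.length := by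
      have := (List.isPrefixOf_iff_prefix.mp h).length_le
      simpa using this
    have hd : (l.drop 5).length = l.length - 5 := List.length_drop ..
    omega
  · simp only [List.length_cons]
    omega

-- A's per-segment contribution (for segments after the first)
def pvFA (sp : List Char) : List Char :=
  if sp ≠ [] ∧ sp.headD ' ' ≠ '{' then
    "\\sqrt{".toList ++ [sp.headD ' '] ++ ['}'] ++ sp.drop 1
  else
    "\\sqrt".toList ++ sp

-- what B's scan emits right after having emitted "\sqrt", remaining input l
def pvAfter (l : List Char) : List Char :=
  match l with
  | [] => []
  | c :: cs =>
    if c ≠ '{' ∧ ¬ "\\sqrt".toList.isPrefixOf (c :: cs) then '{' :: c :: '}' :: pvScanB cs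
    else pvScanB (c :: cs)

theorem pvScanB_eq (l : List Char) :
    pvScanB l =
      if "\\sqrt".toList.isPrefixOf l then "\\sqrt".toList ++ pvAfter (l.drop 5)
      else match l with | [] => [] | c :: cs => c :: pvScanB cs := by
  rw [pvScanB]
  by_cases h : "\\sqrt".toList.isPrefixOf l
  · rw [dif_pos h, if_pos h]
    congr 1
    cases hd : l.drop 5 with
    | nil => simp [pvAfter]
    | cons c cs => simp [pvAfter]
  · rw [dif_neg h, if_neg h]
    cases l <;> rfl

theorem pvSp_ne_nil_aux : ∀ (n : Nat) (l : List Char), l.length ≤ n → pvSp l ≠ [] := by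
  intro n
  induction n with
  | zero =>
    intro l hl
    have hnil : l = [] := by cases l <;> simp_all
    subst hnil
    rw [pvSp]
    simp [List.isPrefixOf]
  | succ n ih =>
    intro l hl
    rw [pvSp]
    by_cases h : "\\sqrt".toList.isPrefixOf l
    · rw [dif_pos h]
      simp
    · rw [dif_neg h]
      cases l with
      | nil => simp
      | cons c cs =>
        have hne := ih cs (by simp at hl; omega)
        cases hx : pvSp cs with
        | nil => exact absurd hx hne
        | cons s t => simp [List.modifyHead, hx]

theorem pvSp_ne_nil (l : List Char) : pvSp l ≠ [] := pvSp_ne_nil_aux l.length l le_rfl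

theorem pvSp_go (fuel : Nat) (l cur : List Char) (acc : List (List Char))
    (hf : l.length ≤ fuel) :
    PySem.Chars.splitOn.go "\\sqrt".toList fuel l cur acc
      = acc.reverse ++ (pvSp l).modifyHead (cur.reverse ++ ·) := by
  induction fuel generalizing l cur acc with
  | zero =>
    have hnil : l = [] := by
      cases l with
      | nil => rfl
      | cons c cs => simp at hf
    subst hnil
    rw [PySem.Chars.splitOn.go, pvSp]
    simp [List.isPrefixOf]
  | succ fuel ih =>
    cases l with
    | nil =>
      rw [PySem.Chars.splitOn.go, pvSp]
      simp [List.isPrefixOf]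
      omega
    | cons c cs =>
      rw [PySem.Chars.splitOn.go]
      by_cases h : "\\sqrt".toList.isPrefixOf (c :: cs)
      · rw [if_pos h]
        have h5 : 5 ≤ (c :: cs).length := by
          have := (List.isPrefixOf_iff_prefix.mp h).length_le
          simpa using this
        have hlen : ((c :: cs).drop "\\sqrt".toList.length).length ≤ fuel := by
          show ((c :: cs).drop 5).length ≤ fuel
          have hd : ((c :: cs).drop 5).length = (c :: cs).length - 5 := List.length_drop ..
          simp only [List.length_cons] at hd hf
          rw [hd]
          omega
        rw [ih _ _ _ hlen]
        conv_rhs => rw [pvSp]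
        rw [dif_pos h]
        have hdrop : ((c :: cs).drop "\\sqrt".toList.length) = ((c :: cs).drop 5) := rfl
        rw [hdrop]
        cases hsp : pvSp ((c :: cs).drop 5) with
        | nil => exact absurd hsp (pvSp_ne_nil _)
        | cons s t => simp [List.modifyHead, hsp]
      · rw [if_neg h]
        have hlen : cs.length ≤ fuel := by simp at hf; omega
        rw [ih _ _ _ hlen]
        conv_rhs => rw [pvSp]
        rw [dif_neg h]
        cases hsp : pvSp cs with
        | nil => exact absurd hsp (pvSp_ne_nil _)
        | cons s t => simp [List.modifyHead, hsp]

theorem pvSplitOn_eq_sp (l : List Char) :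
    PySem.Chars.splitOn l "\\sqrt".toList = pvSp l := by
  rw [PySem.Chars.splitOn]
  rw [pvSp_go (l.length + 1) l [] [] (by omega)]
  cases hsp : pvSp l with
  | nil => exact absurd hsp (pvSp_ne_nil _)
  | cons s t => simp [List.modifyHead, hsp]

-- main invariant: B's scan equals A's rebuild of the split, and the flatMap of
-- A's per-segment contribution equals "\sqrt" followed by B's post-\sqrt emission
theorem pvMain (n : Nat) : ∀ (l : List Char), l.length ≤ n →
    (pvScanB l = (pvSp l).headD [] ++ ((pvSp l).drop 1).flatMap pvFA)
    ∧ ((pvSp l).flatMap pvFA = "\\sqrt".toList ++ pvAfter l) := by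
  induction n with
  | zero =>
    intro l hl
    have hnil : l = [] := by cases l <;> simp_all
    subst hnil
    constructor <;> simp [pvScanB, pvSp, pvFA, pvAfter, List.isPrefixOf]
  | succ n ih =>
    intro l hl
    by_cases h : "\\sqrt".toList.isPrefixOf l
    · have h5 : 5 ≤ l.length := by
        have := (List.isPrefixOf_iff_prefix.mp h).length_le
        simpa using this
      have hy : (l.drop 5).length ≤ n := by
        have : (l.drop 5).length = l.length - 5 := List.length_drop ..
        omega
      obtain ⟨ihP, ihQ⟩ := ih (l.drop 5) hy
      have hsp : pvSp l = [] :: pvSp (l.drop 5) := by rw [pvSp]; rw [dif_pos h]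
      have hscan : pvScanB l = "\\sqrt".toList ++ pvAfter (l.drop 5) := by
        rw [pvScanB_eq, if_pos h]
      constructor
      · rw [hscan, hsp]
        simpa using ihQ.symm
      · rw [hsp]
        simp only [List.flatMap_cons]
        rw [ihQ]
        have hAfter : pvAfter l = pvScanB l := by
          cases l with
          | nil => simp [List.isPrefixOf] at h
          | cons c cs =>
            simp only [pvAfter]
            rw [if_neg]
            intro ⟨_, hnp⟩
            exact hnp h
        rw [hAfter, hscan]
        simp [pvFA]
    · cases l with
      | nil =>
        constructor <;> simp [pvScanB, pvSp, pvFA, pvAfter, List.isPrefixOf]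
      | cons c cs =>
        have hcs : cs.length ≤ n := by simp at hl; omega
        obtain ⟨ihP, ihQ⟩ := ih cs hcs
        have hsp : pvSp (c :: cs) = (pvSp cs).modifyHead (c :: ·) := by
          rw [pvSp]; rw [dif_neg h]
        have hscan : pvScanB (c :: cs) = c :: pvScanB cs := by
          rw [pvScanB_eq, if_neg h]
        obtain ⟨s, t, hst⟩ : ∃ s t, pvSp cs = s :: t := by
          cases hx : pvSp cs with
          | nil => exact absurd hx (pvSp_ne_nil _)
          | cons s t => exact ⟨s, t, rfl⟩
        have hP' : s ++ t.flatMap pvFA = pvScanB cs := by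
          rw [ihP, hst]
          simp
        constructor
        · rw [hscan, hsp, hst]
          simp only [List.modifyHead, List.headD, List.drop]
          rw [ihP, hst]
          simp
        · rw [hsp, hst]
          simp only [List.modifyHead, List.flatMap_cons]
          by_cases hc : c = '{'
          · subst hc
            have hone : pvFA ('{' :: s) = "\\sqrt".toList ++ '{' :: s := by
              simp [pvFA]
            rw [hone]
            have hA : pvAfter ('{' :: cs) = pvScanB ('{' :: cs) := by
              simp [pvAfter]
            rw [hA, hscan]
            simp [hP']
          · have hone : pvFA (c :: s) = "\\sqrt".toList ++ '{' :: c :: '}' :: s := by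
              simp only [pvFA]
              rw [if_pos (by simp [hc])]
              rfl
            rw [hone]
            have hA : pvAfter (c :: cs) = '{' :: c :: '}' :: pvScanB cs := by
              simp only [pvAfter]
              rw [if_pos ⟨hc, fun hp => h hp⟩]
            rw [hA]
            simp [hP']

theorem pvScanB_eq_rebuild (l : List Char) :
    pvScanB l = (pvSp l).headD [] ++ ((pvSp l).drop 1).flatMap pvFA :=
  (pvMain l.length l le_rfl).1

-- if "\sqrt" occurs nowhere in l, the split is trivial
theorem pvSp_of_not_infix (l : List Char) (h : ¬ "\\sqrt".toList <:+: l) : pvSp l = [l] := by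
  induction l with
  | nil => rw [pvSp]; simp [List.isPrefixOf]
  | cons c cs ih =>
    rw [pvSp]
    have hpre : ¬ "\\sqrt".toList.isPrefixOf (c :: cs) := by
      intro hp
      exact h (List.isPrefixOf_iff_prefix.mp hp).isInfix
    rw [dif_neg hpre]
    show (pvSp cs).modifyHead (c :: ·) = [c :: cs]
    have hcs : ¬ "\\sqrt".toList <:+: cs := fun hi => h (hi.trans (List.suffix_cons c cs).isInfix)
    rw [ih hcs]
    simp [List.modifyHead]

theorem pvFoldl_eq_flatMap (t : List (List Char)) (init : List Char) :
    t.foldl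
      (fun ns sp =>
        if sp ≠ [] ∧ sp.headD ' ' ≠ '{' then
          ns ++ "\\sqrt{".toList ++ [sp.headD ' '] ++ ['}'] ++ sp.drop 1
        else
          ns ++ "\\sqrt".toList ++ sp)
      init = init ++ t.flatMap pvFA := by
  have hfun : (fun (ns sp : List Char) =>
      if sp ≠ [] ∧ sp.headD ' ' ≠ '{' then
        ns ++ "\\sqrt{".toList ++ [sp.headD ' '] ++ ['}'] ++ sp.drop 1
      else
        ns ++ "\\sqrt".toList ++ sp)
      = (fun ns sp => ns ++ pvFA sp) := by
    funext ns sp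
    simp only [pvFA]
    split <;> simp
  rw [hfun, PySem.List.foldl_append_eq_flatMap]

-- ===== VERDICT (by name: the statement is the Claim_ definition above) =====
theorem fix_sqrt_py_spec : Claim_equal_fix_sqrt_py := by
  intro string _
  unfold Spec_fix_sqrt_py fix_sqrt_py fix_sqrt_py_alt
  by_cases h : PySem.Str.isIn "\\sqrt" string = false
  · rw [if_pos h]
    have hinf : ¬ "\\sqrt".toList <:+: string.toList := by
      have hiff := PySem.Chars.isIn_eq_false_iff (sub := "\\sqrt".toList) (s := string.toList)
      simp only [PySem.Str.isIn] at h
      exact hiff.mp h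
    have hid : pvScanB string.toList = string.toList := by
      rw [pvScanB_eq_rebuild, pvSp_of_not_infix _ hinf]
      simp
    rw [hid]
    simp [String.ofList]
  · rw [if_neg h]
    simp only
    rw [pvSplitOn_eq_sp]
    rw [pvFoldl_eq_flatMap]
    rw [← pvScanB_eq_rebuild]
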